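-- pv_equiv track=rewrite | github.com/cokkum113/202tooAlgo | sorting.py | solution
-- ===== SOURCE A (Python) =====
-- def solution(numbers):
--     answer = ''
--     nums = {}
--     for i in numbers:
--         x = i % 10
--         nums[i] = x
--
--     nums = sorted(nums.items(), key= lambda x : x[1], reverse=True)
--
--     for i in nums:
--         answer += str(i[0])
--
--
--
--     return answer
-- ===== SOURCE B (Python) =====
-- def solution(numbers):
--     buckets = [[] for _ in range(10)]
--     seen = set()
--     for i in numbers:
--         if i not in seen:
--             seen.add(i)
--             buckets[i % 10].append(i)
--     return ''.join(str(i) for d in range(9, -1, -1) for i in buckets[d])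
-- ===== Notes on version B (the rewrite author's own statement) =====
-- stated objective: faster
-- what changed: replaces the dict build plus comparison sort by last digit with a single-pass bucket sort into 10 digit buckets (dedup via a seen set), emitting buckets 9..0 in first-insertion order
import Mathlib
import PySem

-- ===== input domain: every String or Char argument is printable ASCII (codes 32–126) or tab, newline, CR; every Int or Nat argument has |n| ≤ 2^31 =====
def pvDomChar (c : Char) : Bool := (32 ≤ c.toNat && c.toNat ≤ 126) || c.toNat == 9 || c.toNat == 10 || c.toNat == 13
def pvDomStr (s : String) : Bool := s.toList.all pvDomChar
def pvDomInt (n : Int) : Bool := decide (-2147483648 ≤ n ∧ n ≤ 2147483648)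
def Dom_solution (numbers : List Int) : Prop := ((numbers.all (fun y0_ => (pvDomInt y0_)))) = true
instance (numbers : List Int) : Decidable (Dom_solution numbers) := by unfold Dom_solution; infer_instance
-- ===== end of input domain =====

-- B replaces A's dict build + stable comparison sort by last digit with a one-pass
-- bucket sort into 10 digit buckets (dedup via a seen set), emitted 9..0 (objective: faster).

-- ===== PORT A =====
def solution (numbers : List Int) : String :=
  let answer : String := ""
  let nums : PySem.Dict Int Int :=
    numbers.foldl (fun d i => d.insert i (PySem.Int.mod i 10)) PySem.Dict.empty
  let sortedNums := PySem.List.sorted nums.items (fun x => x.2) true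
  sortedNums.foldl (fun ans i => ans ++ PySem.Int.toStr i.1) answer

-- ===== PORT B =====
def solution_alt (numbers : List Int) : String :=
  let st :=
    numbers.foldl
      (fun (st : PySem.Set Int × List (List Int)) i =>
        if st.1.contains i then st
        else (PySem.Set.add st.1 i,
              PySem.List.pySetD st.2 (PySem.Int.mod i 10)
                (PySem.List.pyGetD st.2 (PySem.Int.mod i 10) [] ++ [i])))
      (PySem.Set.empty, List.replicate 10 [])
  PySem.Str.join ""
    (((PySem.List.pyRange 9 (-1) (-1)).flatMap
        (fun d => PySem.List.pyGetD st.2 d [])).map PySem.Int.toStr)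

-- ===== PRECONDITION & SPEC =====
def Spec_solution (numbers : List Int) (out : String) : Prop := out = solution_alt numbers
instance (numbers : List Int) (out : String) : Decidable (Spec_solution numbers out) := by unfold Spec_solution; infer_instance

-- ===== CLAIM (what is proved, stated in full; the proofs are below) =====
def Claim_equal_solution : Prop := ∀ (numbers : List Int), Dom_solution numbers → Spec_solution numbers (solution numbers)

-- ===== LEMMAS AND PROOFS =====

lemma insertBy_cons {α : Type} (p : α → α → Bool) (x y : α) (ys : List α) :
    PySem.List.insertBy p x (y :: ys)
      = if p x y then x :: y :: ys else y :: PySem.List.insertBy p x ys := rfl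

lemma insertBy_skip {α : Type} (p : α → α → Bool) (x : α) (ys zs : List α)
    (h : ∀ y ∈ ys, p x y = false) :
    PySem.List.insertBy p x (ys ++ zs) = ys ++ PySem.List.insertBy p x zs := by
  induction ys with
  | nil => rfl
  | cons y t ih =>
    have hy := h y (by simp)
    simp only [List.cons_append, insertBy_cons, hy, Bool.false_eq_true, if_false]
    rw [ih (fun z hz => h z (by simp [hz]))]

-- stable sort (reverse=True) with keys in 0..9 is the 9..0 bucket concatenation
lemma sorted_rev_eq_buckets {α : Type} (key : α → Int) (ys : List α)
    (h : ∀ y ∈ ys, 0 ≤ key y ∧ key y < 10) :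
    PySem.List.sorted ys key true
      = (PySem.List.pyRange 9 (-1) (-1)).flatMap
          (fun d => ys.filter (fun y => key y == d)) := by
  rw [PySem.List.sorted_rev_eq_foldl_insertBy]
  induction ys using List.reverseRecOn with
  | nil => simp
  | append_singleton t x ih =>
    rw [List.foldl_append, List.foldl_cons, List.foldl_nil,
        ih (fun y hy => h y (by simp [hy]))]
    obtain ⟨hk0, hk10⟩ := h x (by simp)
    have hsplit : PySem.List.pyRange 9 (-1) (-1)
        = (PySem.List.pyRange (key x + 1) 10 1).reverse
          ++ ([key x] ++ (PySem.List.pyRange 0 (key x) 1).reverse) := by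
      rw [PySem.List.pyRange_neg_one_eq_reverse]
      norm_num
      rw [PySem.List.pyRange_one_append 0 (key x + 1) 10 (by omega) (by omega),
          PySem.List.pyRange_one_succ_right hk0]
      simp
    rw [hsplit]
    simp only [List.flatMap_append, List.flatMap_cons, List.singleton_append]
    -- skip the buckets with digit ≥ key x
    rw [← List.append_assoc]
    rw [insertBy_skip _ x _ _ (by
      intro y hy
      simp only [List.mem_append, List.mem_flatMap, List.mem_reverse,
        PySem.List.mem_pyRange_one, List.mem_filter, beq_iff_eq] at hy
      rcases hy with ⟨d, ⟨hd1, _⟩, _, hkey⟩ | ⟨_, hkey⟩ <;>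
        (simp [hkey]; try omega))]
    -- insert at the head of the buckets with digit < key x
    have hlow : ∀ z ∈ (PySem.List.pyRange 0 (key x) 1).reverse.flatMap
        (fun d => t.filter (fun y => key y == d)), key z < key x := by
      intro z hz
      simp only [List.mem_flatMap, List.mem_reverse, PySem.List.mem_pyRange_one,
        List.mem_filter, beq_iff_eq] at hz
      obtain ⟨d, ⟨_, hd⟩, _, hkey⟩ := hz
      omega
    have hins : PySem.List.insertBy (fun a b => decide (key b < key a)) x
        ((PySem.List.pyRange 0 (key x) 1).reverse.flatMap
          (fun d => t.filter (fun y => key y == d)))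
        = x :: (PySem.List.pyRange 0 (key x) 1).reverse.flatMap
            (fun d => t.filter (fun y => key y == d)) := by
      cases hA : (PySem.List.pyRange 0 (key x) 1).reverse.flatMap
          (fun d => t.filter (fun y => key y == d)) with
      | nil => rfl
      | cons z zs =>
        have := hlow z (by rw [hA]; simp)
        rw [insertBy_cons]
        simp [this]
    rw [hins]
    -- filters of t ++ [x] split into filters of t plus x in its own bucket
    have hfilter : ∀ d : Int, (t ++ [x]).filter (fun y => key y == d)
        = t.filter (fun y => key y == d) ++ (if key x = d then [x] else []) := by
      intro d
      rw [List.filter_append]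
      congr 1
      by_cases hxd : key x = d <;> simp [hxd]
    have hhi : (PySem.List.pyRange (key x + 1) 10 1).reverse.flatMap
        (fun d => (t ++ [x]).filter (fun y => key y == d))
        = (PySem.List.pyRange (key x + 1) 10 1).reverse.flatMap
            (fun d => t.filter (fun y => key y == d)) := by
      apply List.flatMap_congr
      intro d hd
      simp only [List.mem_reverse, PySem.List.mem_pyRange_one] at hd
      rw [hfilter d, if_neg (by omega)]
      simp
    have hlo : (PySem.List.pyRange 0 (key x) 1).reverse.flatMap
        (fun d => (t ++ [x]).filter (fun y => key y == d))
        = (PySem.List.pyRange 0 (key x) 1).reverse.flatMap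
            (fun d => t.filter (fun y => key y == d)) := by
      apply List.flatMap_congr
      intro d hd
      simp only [List.mem_reverse, PySem.List.mem_pyRange_one] at hd
      rw [hfilter d, if_neg (by omega)]
      simp
    rw [hhi, hlo, hfilter (key x), if_pos rfl]
    simp

-- A's dict after the loop: first occurrences of the numbers, each paired with its last digit
lemma dict_items_eq (ns : List Int) :
    (ns.foldl (fun d i => d.insert i (PySem.Int.mod i 10)) PySem.Dict.empty).items
      = (PySem.Set.ofList ns).map (fun i => (i, PySem.Int.mod i 10)) := by
  induction ns using List.reverseRecOn with
  | nil => rfl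
  | append_singleton t x ih =>
    rw [List.foldl_append, List.foldl_cons, List.foldl_nil]
    have hofl : PySem.Set.ofList (t ++ [x]) = PySem.Set.add (PySem.Set.ofList t) x := by
      rw [PySem.Set.ofList_eq_foldl, List.foldl_append, ← PySem.Set.ofList_eq_foldl]
      rfl
    have hkeys : (t.foldl (fun d i => d.insert i (PySem.Int.mod i 10)) PySem.Dict.empty).keys
        = PySem.Set.ofList t := by
      show List.map Prod.fst _ = _
      rw [ih, List.map_map]
      simp [Function.comp_def]
    by_cases hx : x ∈ PySem.Set.ofList t
    · have hc : (t.foldl (fun d i => d.insert i (PySem.Int.mod i 10))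
          PySem.Dict.empty).contains x = true := by
        rw [PySem.Dict.contains_iff_mem_keys, hkeys]; exact hx
      rw [PySem.Dict.items_insert_of_contains _ _ hc, ih, hofl,
          PySem.Set.add, if_pos (by simp [PySem.Set.contains, hx]), List.map_map]
      apply List.map_congr_left
      intro i _
      by_cases hix : i = x <;> simp [hix]
    · have hc : (t.foldl (fun d i => d.insert i (PySem.Int.mod i 10))
          PySem.Dict.empty).contains x = false := by
        rw [← Bool.not_eq_true, PySem.Dict.contains_iff_mem_keys, hkeys]; exact hx
      rw [PySem.Dict.items_insert_of_not_contains _ _ hc, ih, hofl,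
          PySem.Set.add, if_neg (by simp [PySem.Set.contains, hx])]
      simp

-- writing back bucket k of a 10-bucket table given as a map over range(10)
lemma set_map_pyRange (g : Int → List Int) (k : Int) (v : List Int)
    (h0 : 0 ≤ k) (h10 : k < 10) :
    ((PySem.List.pyRange 0 10 1).map g).set k.toNat v
      = (PySem.List.pyRange 0 10 1).map (fun d => if d = k then v else g d) := by
  apply List.ext_getElem
  · simp
  · intro j hj hj'
    simp only [List.length_set, List.length_map, PySem.List.length_pyRange_one] at hj
    rw [List.getElem_set, List.getElem_map, List.getElem_map,
        PySem.List.getElem_pyRange_one 0 10 j (by simpa using hj)]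
    by_cases hjk : k.toNat = j
    · rw [if_pos hjk, if_pos (by omega)]
    · rw [if_neg hjk, if_neg (by omega)]

-- B's loop state: the seen set is the deduped prefix, bucket d holds its elements ending in d
lemma b_state (ns : List Int) :
    ns.foldl
      (fun (st : PySem.Set Int × List (List Int)) i =>
        if st.1.contains i then st
        else (PySem.Set.add st.1 i,
              PySem.List.pySetD st.2 (PySem.Int.mod i 10)
                (PySem.List.pyGetD st.2 (PySem.Int.mod i 10) [] ++ [i])))
      (PySem.Set.empty, List.replicate 10 [])
      = (PySem.Set.ofList ns,
         (PySem.List.pyRange 0 10 1).map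
           (fun d => (PySem.Set.ofList ns).filter (fun i => PySem.Int.mod i 10 == d))) := by
  induction ns using List.reverseRecOn with
  | nil => rfl
  | append_singleton t x ih =>
    rw [List.foldl_append, List.foldl_cons, List.foldl_nil, ih]
    have hofl : PySem.Set.ofList (t ++ [x]) = PySem.Set.add (PySem.Set.ofList t) x := by
      rw [PySem.Set.ofList_eq_foldl, List.foldl_append, ← PySem.Set.ofList_eq_foldl]
      rfl
    have hm0 : (0:Int) ≤ PySem.Int.mod x 10 := PySem.Int.mod_nonneg x (by norm_num)
    have hm10 : PySem.Int.mod x 10 < 10 := PySem.Int.mod_lt x (by norm_num)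
    by_cases hx : x ∈ PySem.Set.ofList t
    · rw [if_pos (by simp [PySem.Set.contains, hx]), hofl,
          PySem.Set.add, if_pos (by simp [PySem.Set.contains, hx])]
    · rw [if_neg (by simp [PySem.Set.contains, hx])]
      have hadd : PySem.Set.add (PySem.Set.ofList t) x = PySem.Set.ofList t ++ [x] := by
        rw [PySem.Set.add, if_neg (by simp [PySem.Set.contains, hx])]
      have hget : PySem.List.pyGetD
          ((PySem.List.pyRange 0 10 1).map
            (fun d => (PySem.Set.ofList t).filter (fun i => PySem.Int.mod i 10 == d)))
          (PySem.Int.mod x 10) []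
          = (PySem.Set.ofList t).filter (fun i => PySem.Int.mod i 10 == PySem.Int.mod x 10) :=
        PySem.List.pyGetD_map_pyRange_of_nonneg _ 10 _ [] hm0 hm10
      rw [hofl, hadd, hget, PySem.List.pySetD_of_nonneg _ _ hm0, set_map_pyRange _ _ _ hm0 hm10]
      congr 1
      apply List.map_congr_left
      intro d _
      rw [List.filter_append]
      by_cases hd : d = PySem.Int.mod x 10
      · rw [if_pos hd, hd]
        simp
      · rw [if_neg hd]
        have hne : PySem.Int.mod x 10 ≠ d := fun h => hd h.symm
        rw [PySem.Int.mod_eq_emod_of_pos (by norm_num)] at hne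
        simp [hne]

-- '' .join with empty separator concatenates
lemma intercalate_nil_flatten (l : List (List Char)) : List.intercalate [] l = l.flatten := by
  induction l with
  | nil => rfl
  | cons a t ih =>
    cases t with
    | nil => simp [List.intercalate]
    | cons b t' =>
      simp [List.intercalate] at ih ⊢
      simpa using ih

lemma join_nil_cons (a : String) (l : List String) :
    PySem.Str.join "" (a :: l) = a ++ PySem.Str.join "" l := by
  simp only [PySem.Str.join, PySem.Chars.join, String.toList_empty, List.map_cons,
    intercalate_nil_flatten, List.flatten_cons, String.ofList_append, String.ofList_toList]

-- A's string-building loop is ''.join of the str values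
lemma fold_append_toStr (l : List Int) (s : String) :
    l.foldl (fun a i => a ++ PySem.Int.toStr i) s
      = s ++ PySem.Str.join "" (l.map PySem.Int.toStr) := by
  induction l generalizing s with
  | nil => simp [PySem.Str.join, PySem.Chars.join, String.toList_empty, List.intercalate]
  | cons i t ih =>
    rw [List.foldl_cons, ih, List.map_cons, join_nil_cons, String.append_assoc]

-- ===== VERDICT (by name: the statement is the Claim_ definition above) =====
theorem solution_spec : Claim_equal_solution := by
  unfold Claim_equal_solution
  intro numbers _
  unfold Spec_solution solution solution_alt
  simp only []
  rw [dict_items_eq, b_state]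
  set S := PySem.Set.ofList numbers with hS
  rw [sorted_rev_eq_buckets _ _ (by
    intro y hy
    simp only [List.mem_map] at hy
    obtain ⟨i, _, rfl⟩ := hy
    exact ⟨PySem.Int.mod_nonneg i (by norm_num), PySem.Int.mod_lt i (by norm_num)⟩)]
  have hbucket : ∀ d : Int,
      (S.map (fun i => (i, PySem.Int.mod i 10))).filter (fun y => y.2 == d)
        = (S.filter (fun i => PySem.Int.mod i 10 == d)).map (fun i => (i, PySem.Int.mod i 10)) := by
    intro d
    rw [List.filter_map]
    rfl
  have hflat : (PySem.List.pyRange 9 (-1) (-1)).flatMap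
      (fun d => (S.map (fun i => (i, PySem.Int.mod i 10))).filter (fun y => y.2 == d))
      = ((PySem.List.pyRange 9 (-1) (-1)).flatMap
          (fun d => S.filter (fun i => PySem.Int.mod i 10 == d))).map
            (fun i => (i, PySem.Int.mod i 10)) := by
    rw [List.map_flatMap]
    exact List.flatMap_congr (fun d _ => hbucket d)
  rw [hflat, List.foldl_map, fold_append_toStr]
  have hgets : (PySem.List.pyRange 9 (-1) (-1)).flatMap
      (fun d => PySem.List.pyGetD
        ((PySem.List.pyRange 0 10 1).map
          (fun e => S.filter (fun i => PySem.Int.mod i 10 == e))) d [])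
      = (PySem.List.pyRange 9 (-1) (-1)).flatMap
          (fun d => S.filter (fun i => PySem.Int.mod i 10 == d)) := by
    apply List.flatMap_congr
    intro d hd
    rw [PySem.List.mem_pyRange_neg_one] at hd
    exact PySem.List.pyGetD_map_pyRange_of_nonneg _ 10 d [] (by omega) (by omega)
  rw [hgets]
  rfl
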